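-- pv_equiv track=rewrite | github.com/GamerTuruu/Neuro-Karaoke-Archive-Metadata | src/scripts/migrate_metadata_fields.py | _split_last_parenthetical
-- ===== SOURCE A (Python) =====
-- def _split_last_parenthetical(text: str) -> tuple[str, str] | None:
--     text = text.rstrip()
--     if not text.endswith(")"):
--         return None
--
--     depth = 0
--     for i in range(len(text) - 1, -1, -1):
--         ch = text[i]
--         if ch == ")":
--             depth += 1
--         elif ch == "(":
--             depth -= 1
--             if depth == 0:
--                 left = text[:i].rstrip()
--                 inner = text[i + 1 : -1].strip()
--                 return left, inner
--
--     return None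
-- ===== SOURCE B (Python) =====
-- def _split_last_parenthetical(text: str) -> tuple[str, str] | None:
--     text = text.rstrip()
--     if not text.endswith(")"):
--         return None
--
--     # Forward pass over everything before the final ")", keeping a stack of
--     # indices of currently-unmatched "(".  The final ")" matches the stack top.
--     stack = []
--     for i in range(len(text) - 1):
--         if text[i] == "(":
--             stack.append(i)
--         elif text[i] == ")" and stack:
--             stack.pop()
--
--     if not stack:
--         return None
--     open_idx = stack[-1]
--     return text[:open_idx].rstrip(), text[open_idx + 1 : -1].strip()
-- ===== Notes on version B (the rewrite author's own statement) =====
-- stated objective: alternative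
-- what changed: Replaces the right-to-left scan with a depth counter by a left-to-right pass that maintains a stack of indices of unmatched '(' characters; the final ')' matches the stack top (or none).
import Mathlib
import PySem

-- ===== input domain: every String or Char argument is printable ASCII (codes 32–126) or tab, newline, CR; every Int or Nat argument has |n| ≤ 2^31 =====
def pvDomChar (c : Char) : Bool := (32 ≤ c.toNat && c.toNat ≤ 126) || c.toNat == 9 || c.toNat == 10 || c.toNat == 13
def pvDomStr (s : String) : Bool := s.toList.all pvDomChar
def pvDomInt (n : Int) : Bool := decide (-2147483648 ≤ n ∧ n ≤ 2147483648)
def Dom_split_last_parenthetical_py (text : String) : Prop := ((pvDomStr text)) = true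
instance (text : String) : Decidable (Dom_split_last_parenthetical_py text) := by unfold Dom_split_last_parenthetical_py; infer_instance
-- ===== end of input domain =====

-- B replaces A's right-to-left depth-counter scan by a left-to-right pass keeping a stack
-- of indices of unmatched '(' (alternative decomposition, same cost).

-- ===== PORT A =====
-- A's loop: for i in range(len(text)-1, -1, -1), depth counter, early return.
-- (the 'none' branch on pyGet? is unreachable: every index produced by the range is in bounds)
def pvALoop (t : String) (idxs : List Int) (depth : Int) : Option (String × String) :=
  match idxs with
  | [] => none
  | i :: rest =>
    match PySem.Str.pyGet? t i with
    | none => none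
    | some ch =>
      if ch = ')' then pvALoop t rest (depth + 1)
      else if ch = '(' then
        if depth - 1 = 0 then
          some (PySem.Str.rstrip (PySem.Str.slice t none (some i)),
                PySem.Str.strip (PySem.Str.slice t (some (i + 1)) (some (-1))))
        else pvALoop t rest (depth - 1)
      else pvALoop t rest depth

def split_last_parenthetical_py (text : String) : Option (String × String) :=
  let t := PySem.Str.rstrip text
  if !(PySem.Str.endswith t ")") then none
  else pvALoop t (PySem.List.pyRange ((PySem.Str.len t : Int) - 1) (-1) (-1)) 0

-- ===== PORT B =====
-- B's loop: for i in range(len(text)-1), stack of indices; append = ++ [i], pop = dropLast,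
-- stack[-1] = getLast?.  (the 'none' branch on pyGet? is unreachable)
def pvBLoop (t : String) (idxs : List Int) (stack : List Int) : List Int :=
  match idxs with
  | [] => stack
  | i :: rest =>
    match PySem.Str.pyGet? t i with
    | none => pvBLoop t rest stack
    | some ch =>
      if ch = '(' then pvBLoop t rest (stack ++ [i])
      else if ch = ')' ∧ stack ≠ [] then pvBLoop t rest stack.dropLast
      else pvBLoop t rest stack

def split_last_parenthetical_py_alt (text : String) : Option (String × String) :=
  let t := PySem.Str.rstrip text
  if !(PySem.Str.endswith t ")") then none
  else
    let stack := pvBLoop t (PySem.List.pyRange 0 ((PySem.Str.len t : Int) - 1) 1) []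
    match stack.getLast? with
    | none => none
    | some j =>
      some (PySem.Str.rstrip (PySem.Str.slice t none (some j)),
            PySem.Str.strip (PySem.Str.slice t (some (j + 1)) (some (-1))))

-- ===== PRECONDITION & SPEC =====
def Spec_split_last_parenthetical_py (text : String) (out : Option (String × String)) : Prop := out = split_last_parenthetical_py_alt text
instance (text : String) (out : Option (String × String)) : Decidable (Spec_split_last_parenthetical_py text out) := by unfold Spec_split_last_parenthetical_py; infer_instance

-- ===== CLAIM (what is proved, stated in full; the proofs are below) =====
def Claim_equal_split_last_parenthetical_py : Prop := ∀ (text : String), Dom_split_last_parenthetical_py text → Spec_split_last_parenthetical_py text (split_last_parenthetical_py text)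

-- ===== LEMMAS AND PROOFS =====

-- the pair both programs build from the index of the matched '('
def pvMk (t : String) (i : Int) : String × String :=
  (PySem.Str.rstrip (PySem.Str.slice t none (some i)),
   PySem.Str.strip (PySem.Str.slice t (some (i + 1)) (some (-1))))

theorem pvBLoop_append (t : String) (l1 l2 : List Int) (σ : List Int) :
    pvBLoop t (l1 ++ l2) σ = pvBLoop t l2 (pvBLoop t l1 σ) := by
  induction l1 generalizing σ with
  | nil => simp [pvBLoop]
  | cons i rest ih =>
    simp only [List.cons_append, pvBLoop]
    cases PySem.Str.pyGet? t i with
    | none => exact ih σ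
    | some ch =>
      by_cases h1 : ch = '('
      · simp [h1, ih]
      · by_cases h2 : ch = ')' ∧ σ ≠ []
        · simp [h2, ih]
        · simp [h1, h2, ih]

-- KEY: A's backward scan over indices [m-1 .. 0] with depth d ≥ 1 returns the pair built
-- from the d-th element (from the top) of B's forward stack over indices [0 .. m-1].
theorem pv_key (t : String) (m : Nat) (hm : m ≤ t.toList.length) (d : Int) (hd : 1 ≤ d) :
    pvALoop t (PySem.List.pyRange ((m : Int) - 1) (-1) (-1)) d
      = ((pvBLoop t (PySem.List.pyRange 0 (m : Int) 1) []).reverse[(d - 1).toNat]?).map (pvMk t) := by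
  induction m generalizing d with
  | zero =>
    rw [PySem.List.pyRange_neg_one_eq_nil (by omega), PySem.List.pyRange_one_eq_nil (by omega)]
    simp [pvALoop, pvBLoop]
  | succ m ih =>
    have hmlt : m < t.toList.length := by omega
    have hcast : ((m + 1 : Nat) : Int) - 1 = (m : Int) := by push_cast; ring
    rw [hcast, PySem.List.pyRange_neg_one_cons (by omega : (-1 : Int) < (m : Int))]
    have hrng : PySem.List.pyRange 0 ((m + 1 : Nat) : Int) 1
        = PySem.List.pyRange 0 (m : Int) 1 ++ [(m : Int)] := by
      have hc2 : ((m + 1 : Nat) : Int) = (m : Int) + 1 := by push_cast; ring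
      rw [hc2, PySem.List.pyRange_one_succ_right (by omega)]
    rw [hrng, pvBLoop_append]
    set σ := pvBLoop t (PySem.List.pyRange 0 (m : Int) 1) [] with hσ
    have hget : PySem.Str.pyGet? t (m : Int) = some (t.toList[m]'hmlt) := by
      simp [List.getElem?_eq_getElem hmlt]
    obtain ⟨c, hc⟩ : ∃ c, PySem.Str.pyGet? t (m : Int) = some c := ⟨_, hget⟩
    simp only [pvALoop, pvBLoop, hc]
    by_cases h1 : c = ')'
    · subst h1
      rw [if_pos rfl, if_neg (by decide)]
      by_cases hσe : σ = []
      · rw [if_neg (by simp [hσe])]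
        rw [ih (by omega) (d + 1) (by omega)]
        simp [hσe]
      · rw [if_pos ⟨rfl, hσe⟩]
        rw [ih (by omega) (d + 1) (by omega)]
        rw [← List.tail_reverse, List.getElem?_tail]
        have h2 : (d + 1 - 1).toNat = (d - 1).toNat + 1 := by omega
        rw [h2]
    · by_cases h2 : c = '('
      · subst h2
        rw [if_neg (by decide), if_pos rfl, if_pos rfl]
        by_cases hd1 : d = 1
        · subst hd1
          rw [if_pos (by norm_num)]
          simp [List.reverse_append, pvMk]
        · rw [if_neg (by omega)]
          rw [ih (by omega) (d - 1) (by omega)]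
          have h3 : (d - 1).toNat = (d - 1 - 1).toNat + 1 := by omega
          rw [h3, List.reverse_append]
          simp
      · rw [if_neg h1, if_neg h2, if_neg h2, if_neg (fun h => h1 h.1)]
        exact ih (by omega) d hd

-- ===== VERDICT (by name: the statement is the Claim_ definition above) =====
theorem split_last_parenthetical_py_spec : Claim_equal_split_last_parenthetical_py := by
  intro text _
  unfold Spec_split_last_parenthetical_py split_last_parenthetical_py split_last_parenthetical_py_alt
  set t := PySem.Str.rstrip text with ht
  by_cases he : PySem.Str.endswith t ")" = true
  · simp only [he, Bool.not_true, Bool.false_eq_true, if_false]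
    -- t ends with ')': its char list is u ++ [')']
    have hsuf : [')'] <:+ t.toList := by
      have h := (PySem.Chars.endswith_iff t.toList [')']).mp (by simpa using he)
      exact h
    obtain ⟨u, hu⟩ := hsuf
    have hu' : t.toList = u ++ [')'] := hu.symm
    have hlen : ((PySem.Str.len t : Int) - 1) = ((t.toList.length : Int) - 1) := by
      simp [PySem.Str.len_eq]
    rw [hlen]
    have hpos : 1 ≤ t.toList.length := by rw [hu']; simp
    -- peel the first (rightmost) index n-1: the char there is ')'
    rw [PySem.List.pyRange_neg_one_cons (by omega : (-1 : Int) < (t.toList.length : Int) - 1)]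
    have hlast : PySem.Str.pyGet? t ((t.toList.length : Int) - 1) = some ')' := by
      have h1 : ((t.toList.length : Int) - 1) = ((t.toList.length - 1 : Nat) : Int) := by omega
      rw [h1, PySem.Str.pyGet?_natCast, hu']
      have h2 : (u ++ [')']).length - 1 = u.length := by simp
      rw [h2, List.getElem?_concat_length]
    simp only [pvALoop, hlast, reduceIte, zero_add]
    have hkey := pv_key t (t.toList.length - 1) (by omega) 1 (by omega)
    have hc2 : (((t.toList.length - 1 : Nat)) : Int) = ((t.toList.length : Int) - 1) := by omega
    rw [hc2] at hkey
    rw [hkey]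
    rw [show ((1 : Int) - 1).toNat = 0 from rfl, ← List.head?_eq_getElem?, List.head?_reverse]
    cases hg : (pvBLoop t (PySem.List.pyRange 0 ((t.toList.length : Int) - 1) 1) []).getLast? with
    | none => simp
    | some j => simp [pvMk]
  · rw [Bool.not_eq_true] at he
    simp only [he, Bool.not_false, if_true]
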